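-- pv_equiv track=rewrite | github.com/lapillo/adventofcode2023 | zadanie_14/app copy.py | get_rocks_columns
-- ===== SOURCE A (Python) =====
-- def get_rocks_columns(AR):
--     AR_IND={}
--     for r in AR:
--         x,y,c = r
--         if x in AR_IND:
--             AR_IND[x].append(r)
--         else:
--             AR_IND[x] = [r]
--     for i in AR_IND:
--         AR_IND[i]=sorted(AR_IND[i],key=lambda x: x[1],reverse=False)
--     return AR_IND
-- ===== SOURCE B (Python) =====
-- def get_rocks_columns(AR):
--     # One global stable sort by y, then a single distribute pass into
--     # buckets whose keys were created in first-appearance order.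
--     AR_IND = {}
--     for r in AR:
--         AR_IND.setdefault(r[0], [])
--     for r in sorted(AR, key=lambda t: t[1]):
--         AR_IND[r[0]].append(r)
--     return AR_IND
-- ===== Notes on version B (the rewrite author's own statement) =====
-- stated objective: alternative
-- what changed: Instead of grouping first and then sorting each bucket separately, B creates the empty buckets in first-appearance key order, performs one global stable sort of AR by y, and distributes the sorted rocks into the buckets in a single pass.
import Mathlib
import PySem

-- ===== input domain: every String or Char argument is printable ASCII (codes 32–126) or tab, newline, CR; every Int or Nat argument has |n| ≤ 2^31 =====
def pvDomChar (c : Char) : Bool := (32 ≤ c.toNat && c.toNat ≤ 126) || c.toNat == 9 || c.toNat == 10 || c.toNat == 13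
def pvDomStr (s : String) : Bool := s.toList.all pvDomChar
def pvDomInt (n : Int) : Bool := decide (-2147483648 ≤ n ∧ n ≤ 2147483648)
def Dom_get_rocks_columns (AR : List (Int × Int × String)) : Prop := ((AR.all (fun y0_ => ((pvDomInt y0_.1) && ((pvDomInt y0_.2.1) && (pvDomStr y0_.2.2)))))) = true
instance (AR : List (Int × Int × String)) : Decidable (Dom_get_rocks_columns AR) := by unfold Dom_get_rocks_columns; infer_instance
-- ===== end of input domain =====

-- B replaces A's group-then-sort-each-bucket with one global stable sort by y followed by a
-- single distribute pass into buckets created in first-appearance key order (alternative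
-- decomposition, same exact result).


-- ===== PORT A =====
-- A: group the rocks into a dict keyed by x (append / fresh singleton), then
-- re-sort every bucket by y with a second loop over the keys.
def get_rocks_columns (AR : List (Int × Int × String)) : List (Int × List (Int × Int × String)) :=
  let d := AR.foldl (fun d r =>
    if d.contains r.1 then d.modify r.1 [] (fun l => l ++ [r])
    else d.insert r.1 [r]) PySem.Dict.empty
  let d2 := d.keys.foldl
    (fun d i => d.insert i (PySem.List.sorted (d.getD i []) (fun x => x.2.1) false)) d
  d2.items

-- ===== PORT B =====
-- B: create empty buckets in first-appearance key order, then one global stable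
-- sort of AR by y and a single distribute pass appending each rock to its bucket.
def get_rocks_columns_alt (AR : List (Int × Int × String)) : List (Int × List (Int × Int × String)) :=
  let d := AR.foldl (fun d r => d.setdefault r.1 []) PySem.Dict.empty
  let d2 := (PySem.List.sorted AR (fun t => t.2.1)).foldl
    (fun d r => d.modify r.1 [] (fun l => l ++ [r])) d
  d2.items

-- ===== PRECONDITION & SPEC =====
def Spec_get_rocks_columns (AR : List (Int × Int × String)) (out : List (Int × List (Int × Int × String))) : Prop := out = get_rocks_columns_alt AR
instance (AR : List (Int × Int × String)) (out : List (Int × List (Int × Int × String))) : Decidable (Spec_get_rocks_columns AR out) := by unfold Spec_get_rocks_columns; infer_instance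

-- ===== CLAIM (what is proved, stated in full; the proofs are below) =====
def Claim_equal_get_rocks_columns : Prop := ∀ (AR : List (Int × Int × String)), Dom_get_rocks_columns AR → Spec_get_rocks_columns AR (get_rocks_columns AR)

-- ===== LEMMAS AND PROOFS =====

-- A's first-loop body is exactly a `modify` step.
theorem pv_stepA_eq (d : PySem.Dict Int (List (Int × Int × String))) (r : Int × Int × String) :
    (if d.contains r.1 then d.modify r.1 [] (fun l => l ++ [r]) else d.insert r.1 [r])
      = d.modify r.1 [] (fun l => l ++ [r]) := by
  by_cases h : d.contains r.1 = true
  · simp [h]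
  · simp [PySem.Dict.modify, eq_false_of_ne_true h,
      PySem.Dict.getD_of_not_contains d _ (eq_false_of_ne_true h)]

theorem pv_groupA_getD (AR : List (Int × Int × String))
    (d : PySem.Dict Int (List (Int × Int × String))) (c : Int) :
    (AR.foldl (fun d r => d.modify r.1 [] (fun l => l ++ [r])) d).getD c []
      = d.getD c [] ++ AR.filter (fun r => r.1 == c) := by
  have h : AR.foldl (fun d r => d.modify r.1 [] (fun l => l ++ [r])) d
      = (AR.map (fun r => (r.1, r))).foldl (fun d p => d.modify p.1 [] (fun l => l ++ [p.2])) d := by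
    rw [List.foldl_map]
  rw [h, PySem.Dict.getD_foldl_modify_append]
  rw [List.filter_map, List.map_map]
  congr 1
  simp [Function.comp_def]

-- the keys after either grouping loop, as a PySem.Set
theorem pv_groupA_keys (AR : List (Int × Int × String))
    (d : PySem.Dict Int (List (Int × Int × String))) :
    (AR.foldl (fun d r => d.modify r.1 [] (fun l => l ++ [r])) d).keys
      = PySem.Set.update d.keys (AR.map (fun r => r.1)) :=
  PySem.Dict.keys_foldl_modify_key AR (fun r => r.1) [] (fun _ r l => l ++ [r]) d

theorem pv_setdefault_keys : ∀ (AR : List (Int × Int × String))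
    (d : PySem.Dict Int (List (Int × Int × String))),
    (AR.foldl (fun d r => d.setdefault r.1 []) d).keys
      = PySem.Set.update d.keys (AR.map (fun r => r.1))
  | [], d => rfl
  | r :: t, d => by
    rw [List.foldl_cons, pv_setdefault_keys t, List.map_cons]
    show _ = PySem.Set.update (PySem.Set.add d.keys r.1) (t.map (fun r => r.1))
    congr 1
    rw [PySem.Dict.keys_setdefault]
    by_cases h : d.contains r.1 = true
    · have hm : r.1 ∈ d.keys := (PySem.Dict.contains_iff_mem_keys d r.1).1 h
      have hc : PySem.Set.contains d.keys r.1 = true := by simp [PySem.Set.contains, hm]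
      simp only [if_pos h, PySem.Set.add, hc, if_true]
    · have hm : r.1 ∉ d.keys := fun hx => h ((PySem.Dict.contains_iff_mem_keys d r.1).2 hx)
      have hc : PySem.Set.contains d.keys r.1 = false := by simp [PySem.Set.contains, hm]
      simp only [if_neg h, PySem.Set.add, hc, Bool.false_eq_true, if_false]

theorem pv_setdefault_getD : ∀ (AR : List (Int × Int × String))
    (d : PySem.Dict Int (List (Int × Int × String))),
    (∀ k, d.getD k [] = []) → ∀ k, (AR.foldl (fun d r => d.setdefault r.1 []) d).getD k [] = []
  | [], _, h, k => h k
  | r :: t, d, h, k => by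
    rw [List.foldl_cons]
    refine pv_setdefault_getD t _ ?_ k
    intro k2
    by_cases hk : k2 = r.1
    · subst hk; rw [PySem.Dict.getD_setdefault_self]; exact h r.1
    · rw [PySem.Dict.getD_eq_get?_getD, PySem.Dict.get?_setdefault_of_ne _ _ hk,
        ← PySem.Dict.getD_eq_get?_getD]; exact h k2

-- items of a dict with Nodup keys, as a map over its keys
theorem pv_items_eq_keys_map (d : PySem.Dict Int (List (Int × Int × String)))
    (h : d.keys.Nodup) : d.items = d.keys.map (fun k => (k, d.getD k [])) := by
  have hkeys : d.keys = d.items.map (fun p => p.1) := rfl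
  apply List.ext_getElem
  · simp [hkeys]
  · intro i h1 h2
    have hlen : i < d.items.length := h1
    have hmem : (d.items[i].1, d.items[i].2) ∈ d.items := by
      simp only [Prod.mk.eta]
      exact List.getElem_mem hlen
    have hget := PySem.Dict.getD_of_mem_items d hmem h []
    have hkl : i < d.keys.length := by simp [hkeys]; exact h1
    have hkeq : d.keys[i] = d.items[i].1 := by simp [hkeys]
    simp [List.getElem_map, hkeq, hget]

-- second loop of A: inserting at existing keys keeps the keys
theorem pv_loop2_keys (g : List (Int × Int × String) → List (Int × Int × String)) :
    ∀ (ks : List Int) (d : PySem.Dict Int (List (Int × Int × String))),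
    (∀ i ∈ ks, i ∈ d.keys) →
    (ks.foldl (fun d i => d.insert i (g (d.getD i []))) d).keys = d.keys
  | [], _, _ => rfl
  | i :: t, d, h => by
    rw [List.foldl_cons]
    have hc : d.contains i = true := (PySem.Dict.contains_iff_mem_keys d i).2 (h i (by simp))
    have hk := PySem.Dict.keys_insert_of_contains d (g (d.getD i [])) hc
    rw [pv_loop2_keys g t _ (fun j hj => by rw [hk]; exact h j (by simp [hj])), hk]

theorem pv_loop2_getD (g : List (Int × Int × String) → List (Int × Int × String)) :
    ∀ (ks : List Int) (d : PySem.Dict Int (List (Int × Int × String))), ks.Nodup → ∀ k,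
    (ks.foldl (fun d i => d.insert i (g (d.getD i []))) d).getD k []
      = if k ∈ ks then g (d.getD k []) else d.getD k []
  | [], _, _, k => by simp
  | i :: t, d, hnd, k => by
    rw [List.foldl_cons, pv_loop2_getD g t _ (List.Nodup.of_cons hnd) k]
    by_cases ht : k ∈ t
    · have hki : k ≠ i := fun h => (List.nodup_cons.1 hnd).1 (h ▸ ht)
      simp [ht, PySem.Dict.getD_insert, hki]
    · by_cases hki : k = i
      · subst hki; simp [ht]
      · simp [ht, PySem.Dict.getD_insert, hki]

-- Set.update by elements already present is the identity
theorem pv_set_update_of_mem : ∀ (l : List Int) (s : PySem.Set Int),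
    (∀ x ∈ l, x ∈ s) → PySem.Set.update s l = s
  | [], _, _ => rfl
  | x :: t, s, h => by
    have hm : x ∈ s := h x (by simp)
    have hc : PySem.Set.contains s x = true := by simp [PySem.Set.contains, hm]
    have hadd : PySem.Set.add s x = s := by simp [PySem.Set.add, hm]
    show PySem.Set.update (PySem.Set.add s x) t = s
    rw [hadd]
    exact pv_set_update_of_mem t s (fun y hy => h y (by simp [hy]))

-- ===== the stable-sort / filter exchange =====
theorem pv_insertBy_all_lt (x : Int × Int × String) :
    ∀ (l : List (Int × Int × String)), (∀ z ∈ l, x.2.1 < z.2.1) →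
    PySem.List.insertBy (fun a b => decide (a.2.1 < b.2.1)) x l = x :: l
  | [], _ => rfl
  | y :: t, h => by simp [PySem.List.insertBy, h y (by simp)]

theorem pv_insertBy_filter (p : (Int × Int × String) → Bool) (x : Int × Int × String) :
    ∀ (l : List (Int × Int × String)), l.Pairwise (fun a b => a.2.1 ≤ b.2.1) →
    (PySem.List.insertBy (fun a b => decide (a.2.1 < b.2.1)) x l).filter p
      = if p x then PySem.List.insertBy (fun a b => decide (a.2.1 < b.2.1)) x (l.filter p)
        else l.filter p
  | [], _ => by
    by_cases hpx : p x <;> simp [PySem.List.insertBy, List.filter, hpx]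
  | y :: t, hp => by
    have hy : ∀ z ∈ t, y.2.1 ≤ z.2.1 := (List.pairwise_cons.1 hp).1
    have ht : t.Pairwise (fun a b => a.2.1 ≤ b.2.1) := (List.pairwise_cons.1 hp).2
    by_cases hxy : x.2.1 < y.2.1
    · rw [show PySem.List.insertBy (fun a b => decide (a.2.1 < b.2.1)) x (y :: t)
            = x :: y :: t by simp [PySem.List.insertBy, hxy]]
      by_cases hpx : p x
      · rw [if_pos hpx]
        have hall : ∀ z ∈ (y :: t).filter p, x.2.1 < z.2.1 := by
          intro z hz
          have hz' : z ∈ y :: t := List.mem_of_mem_filter hz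
          rcases List.mem_cons.1 hz' with h | h
          · exact h ▸ hxy
          · exact lt_of_lt_of_le hxy (hy z h)
        rw [pv_insertBy_all_lt x _ hall]
        simp [List.filter, hpx]
      · simp [List.filter, hpx]
    · rw [show PySem.List.insertBy (fun a b => decide (a.2.1 < b.2.1)) x (y :: t)
            = y :: PySem.List.insertBy (fun a b => decide (a.2.1 < b.2.1)) x t by
          simp [PySem.List.insertBy, hxy]]
      by_cases hpy : p y
      · by_cases hpx : p x
        · rw [if_pos hpx]
          rw [show (y :: t).filter p = y :: t.filter p by simp [List.filter, hpy]]
          rw [show PySem.List.insertBy (fun a b => decide (a.2.1 < b.2.1)) x (y :: t.filter p)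
                = y :: PySem.List.insertBy (fun a b => decide (a.2.1 < b.2.1)) x (t.filter p) by
              simp [PySem.List.insertBy, hxy]]
          rw [show (y :: PySem.List.insertBy (fun a b => decide (a.2.1 < b.2.1)) x t).filter p
                = y :: (PySem.List.insertBy (fun a b => decide (a.2.1 < b.2.1)) x t).filter p by
              simp [List.filter, hpy]]
          rw [pv_insertBy_filter p x t ht, if_pos hpx]
        · rw [if_neg hpx]
          rw [show (y :: PySem.List.insertBy (fun a b => decide (a.2.1 < b.2.1)) x t).filter p
                = y :: (PySem.List.insertBy (fun a b => decide (a.2.1 < b.2.1)) x t).filter p by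
              simp [List.filter, hpy]]
          rw [pv_insertBy_filter p x t ht, if_neg hpx]
          simp [List.filter, hpy]
      · rw [show (y :: PySem.List.insertBy (fun a b => decide (a.2.1 < b.2.1)) x t).filter p
              = (PySem.List.insertBy (fun a b => decide (a.2.1 < b.2.1)) x t).filter p by
            simp [List.filter, hpy]]
        rw [pv_insertBy_filter p x t ht]
        simp [List.filter, hpy]

theorem pv_filter_sorted (p : (Int × Int × String) → Bool) (xs : List (Int × Int × String)) :
    (PySem.List.sorted xs (fun t => t.2.1)).filter p
      = PySem.List.sorted (xs.filter p) (fun t => t.2.1) := by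
  induction xs using List.reverseRecOn with
  | nil => rfl
  | append_singleton xs x ih =>
    rw [PySem.List.sorted_eq_foldl_insertBy, List.foldl_append, List.foldl_cons, List.foldl_nil,
      ← PySem.List.sorted_eq_foldl_insertBy,
      pv_insertBy_filter p x _ (PySem.List.sorted_pairwise xs (fun t => t.2.1)), ih,
      List.filter_append]
    by_cases hpx : p x
    · rw [if_pos hpx, show List.filter p [x] = [x] by simp [hpx],
        PySem.List.sorted_eq_foldl_insertBy (xs.filter p ++ [x]), List.foldl_append,
        List.foldl_cons, List.foldl_nil, ← PySem.List.sorted_eq_foldl_insertBy]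
    · rw [if_neg hpx, show List.filter p [x] = [] by simp [hpx], List.append_nil]

-- ===== VERDICT (by name: the statement is the Claim_ definition above) =====
theorem get_rocks_columns_spec : Claim_equal_get_rocks_columns := by
  intro AR _
  show get_rocks_columns AR = get_rocks_columns_alt AR
  have hA0 : AR.foldl (fun d r =>
        if d.contains r.1 then d.modify r.1 [] (fun l => l ++ [r]) else d.insert r.1 [r])
        PySem.Dict.empty
      = AR.foldl (fun d r => d.modify r.1 [] (fun l => l ++ [r])) PySem.Dict.empty := by
    congr 1
    funext d r
    exact pv_stepA_eq d r
  simp only [get_rocks_columns, get_rocks_columns_alt, hA0]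
  set dA := AR.foldl (fun d r => d.modify r.1 [] (fun l => l ++ [r])) PySem.Dict.empty with hdA
  set dB0 := AR.foldl (fun d r => d.setdefault r.1 []) PySem.Dict.empty with hdB0
  set S := PySem.List.sorted AR (fun t => t.2.1) with hS
  have hKA : dA.keys = PySem.Set.update [] (AR.map (fun r => r.1)) := by
    rw [hdA, pv_groupA_keys]
    rfl
  have hofl : PySem.Set.update ([] : PySem.Set Int) (AR.map (fun r => r.1))
      = PySem.Set.ofList (AR.map (fun r => r.1)) := rfl
  have hnodA : dA.keys.Nodup := by
    rw [hKA, hofl]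
    exact PySem.Set.nodup_ofList _
  have hgA : ∀ c, dA.getD c [] = AR.filter (fun r => r.1 == c) := fun c => by
    rw [hdA, pv_groupA_getD]
    simp [PySem.Dict.getD_empty]
  have hKB : dB0.keys = dA.keys := by
    rw [hdB0, pv_setdefault_keys, hKA]
    rfl
  have hgB0 : ∀ k, dB0.getD k [] = [] := by
    rw [hdB0]
    exact pv_setdefault_getD AR _ (fun k => by simp [PySem.Dict.getD_empty])
  have hKB2 : (S.foldl (fun d r => d.modify r.1 [] (fun l => l ++ [r])) dB0).keys = dA.keys := by
    rw [pv_groupA_keys, hKB]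
    apply pv_set_update_of_mem
    intro x hx
    rcases List.mem_map.1 hx with ⟨r, hr, hrx⟩
    have hrAR : r ∈ AR := (PySem.List.mem_sorted AR (fun t => t.2.1) false r).1 (hS ▸ hr)
    rw [hKA, hofl]
    exact (PySem.Set.mem_ofList _ _).2 (List.mem_map.2 ⟨r, hrAR, hrx⟩)
  have hgB2 : ∀ k, (S.foldl (fun d r => d.modify r.1 [] (fun l => l ++ [r])) dB0).getD k []
      = S.filter (fun r => r.1 == k) := fun k => by
    rw [pv_groupA_getD, hgB0]
    simp
  have hKA2 : (dA.keys.foldl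
      (fun d i => d.insert i (PySem.List.sorted (d.getD i []) (fun x => x.2.1) false)) dA).keys
      = dA.keys :=
    pv_loop2_keys (fun l => PySem.List.sorted l (fun x => x.2.1) false) dA.keys dA (fun _ hi => hi)
  have hgA2 : ∀ k ∈ dA.keys, (dA.keys.foldl
      (fun d i => d.insert i (PySem.List.sorted (d.getD i []) (fun x => x.2.1) false)) dA).getD k []
      = PySem.List.sorted (AR.filter (fun r => r.1 == k)) (fun x => x.2.1) false := fun k hk => by
    rw [pv_loop2_getD (fun l => PySem.List.sorted l (fun x => x.2.1) false) dA.keys dA hnodA k,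
      if_pos hk, hgA]
  rw [pv_items_eq_keys_map _ (hKA2.symm ▸ hnodA), pv_items_eq_keys_map _ (hKB2.symm ▸ hnodA),
    hKA2, hKB2]
  apply List.map_congr_left
  intro k hk
  rw [hgA2 k hk, hgB2 k, hS, pv_filter_sorted (fun r => r.1 == k) AR]
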